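-- pv_equiv track=rewrite | github.com/pypi-data/pypi-mirror-377 | packages/CNSistent/cnsistent-0.9.0-py3-none-any.whl/cns/process/segments.py | find_overlaps
-- ===== SOURCE A (Python) =====
-- def find_overlaps(segs, is_sorted=False):
--     """
--     Finds overlapping segments in the input dictionary.
--
--     Parameters
--     ----------
--     segs : dict
--         Dictionary of segments with chromosome names as keys and list of segments as values.
--     is_sorted : bool, optional
--         If True, assumes the segments are already sorted. Default is False.
--
--     Returns
--     -------
--     dict
--         Dictionary of overlapping segments with chromosome names as keys and list of overlapping segments as values.
--     """
--     overlaps = {}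
--     for chr, chr_segs in segs.items():
--         if not is_sorted:
--             chr_segs.sort(key=lambda x: (x[0]))
--         # Iterate through all pairs of triplets to check for overlap
--         n = len(chr_segs)
--         for i in range(n):
--             current_end = chr_segs[i][1]
--             for j in range(i + 1, n):
--                 next_start = chr_segs[j][0]
--                 if current_end <= next_start:
--                     break
--                 # Store the overlap along with the group identifiers
--                 if chr not in overlaps:
--                     overlaps[chr] = []
--                 overlaps[chr].append((next_start, current_end))
--
--     return overlaps
-- ===== SOURCE B (Python) =====
-- def find_overlaps(segs, is_sorted=False):
--     overlaps = {}
--     for chr, chr_segs in segs.items():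
--         if not is_sorted:
--             chr_segs.sort(key=lambda x: (x[0]))
--         n = len(chr_segs)
--         starts = [s[0] for s in chr_segs]
--         # Offline cutoff computation: visit segments in ascending order of their end and
--         # advance a single pointer over the sorted starts, so cutoff[i] = number of starts
--         # strictly below chr_segs[i][1], computed for all i in one two-pointer merge.
--         cutoff = [0] * n
--         p = 0
--         for i, seg in sorted(enumerate(chr_segs), key=lambda t: t[1][1]):
--             e = seg[1]
--             while p < n and starts[p] < e:
--                 p += 1
--             cutoff[i] = p
--         out = []
--         for i in range(n):
--             e = chr_segs[i][1]
--             for j in range(i + 1, cutoff[i]):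
--                 out.append((starts[j], e))
--         if out:
--             overlaps[chr] = out
--     return overlaps
-- ===== Notes on version B (the rewrite author's own statement) =====
-- stated objective: alternative
-- what changed: B removes A's per-segment inner break-scan entirely: it argsorts the segments of each chromosome by end and sweeps one pointer across the sorted starts (an offline two-pointer merge), computing every overlap cutoff in a single pass, then emits the windows and inserts each chromosome's list only when non-empty instead of A's lazy in-dict key creation.
-- outside the precondition, e.g. on find_overlaps({'c': [(3, 2), (-1, -3), (3, -4)]}, True): A returns {'c': [(-1, 2)]}, B returns {}
import Mathlib
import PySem

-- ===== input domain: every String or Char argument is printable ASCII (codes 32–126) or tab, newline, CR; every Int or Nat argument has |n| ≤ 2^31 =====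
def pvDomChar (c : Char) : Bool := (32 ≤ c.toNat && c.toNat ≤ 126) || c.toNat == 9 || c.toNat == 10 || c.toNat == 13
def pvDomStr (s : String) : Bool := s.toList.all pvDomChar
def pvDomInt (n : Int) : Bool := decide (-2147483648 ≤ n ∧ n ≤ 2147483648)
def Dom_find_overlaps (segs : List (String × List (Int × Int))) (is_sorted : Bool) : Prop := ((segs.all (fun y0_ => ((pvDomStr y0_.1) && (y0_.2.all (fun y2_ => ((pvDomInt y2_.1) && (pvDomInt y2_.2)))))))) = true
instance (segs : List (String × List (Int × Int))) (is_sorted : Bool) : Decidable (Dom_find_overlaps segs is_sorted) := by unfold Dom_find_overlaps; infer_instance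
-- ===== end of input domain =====

-- B replaces A's inner break-scan by an argsort-by-end plus a single two-pointer sweep over the
-- sorted starts that computes every overlap cutoff at once (alternative algorithm, no speed
-- claim); both A and B sort each chromosome's list in place when is_sorted is False — the
-- equivalence proved here is about the return value.

-- ===== PORT A =====
-- inner loop: 'for j in range(i+1, n): next_start = chr_segs[j][0]; if current_end <= next_start: break; …append…'
def pvInnerA (chr : String) (current_end : Int) :
    List (Int × Int) → PySem.Dict String (List (Int × Int)) → PySem.Dict String (List (Int × Int))
  | [], ov => ov
  | seg :: tl, ov =>
    if current_end ≤ seg.1 then ov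
    else
      let ov' := if ov.contains chr then ov else ov.insert chr []
      pvInnerA chr current_end tl (ov'.insert chr (ov'.getD chr [] ++ [(seg.1, current_end)]))

-- outer loop: 'for i in range(n): current_end = chr_segs[i][1]; <inner loop over j>'
def pvOuterA (chr : String) :
    List (Int × Int) → PySem.Dict String (List (Int × Int)) → PySem.Dict String (List (Int × Int))
  | [], ov => ov
  | seg :: tl, ov => pvOuterA chr tl (pvInnerA chr seg.2 tl ov)

def find_overlaps (segs : List (String × List (Int × Int))) (is_sorted : Bool) : List (String × List (Int × Int)) :=
  (segs.foldl (fun ov p =>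
      let chr_segs := if is_sorted = false then PySem.List.sorted p.2 (fun x => x.1) else p.2
      pvOuterA p.1 chr_segs ov)
    PySem.Dict.empty).items

-- ===== PORT B =====
-- 'while p < n and starts[p] < e: p += 1'
def pvAdvance (starts : List Int) (e : Int) (p : Nat) : Nat :=
  if h : p < starts.length ∧ starts.getD p 0 < e then pvAdvance starts e (p + 1) else p
termination_by starts.length - p
decreasing_by omega

-- 'for j in range(i+1, bound): out.append((starts[j], e))'
def pvEmitB (starts : List Int) (current_end : Int) : Nat → Nat → List (Int × Int) → List (Int × Int)
  | j, bound, out =>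
    if j < bound then pvEmitB starts current_end (j + 1) bound (out ++ [(starts.getD j 0, current_end)])
    else out
termination_by j bound _ => bound - j

-- 'for i in range(n): e = chr_segs[i][1]; <emit window up to cutoff[i]>'
def pvLoopB (chr_segs : List (Int × Int)) (starts : List Int) (cutoff : List Nat) (n : Nat) :
    Nat → List (Int × Int) → List (Int × Int)
  | i, out =>
    if i < n then
      pvLoopB chr_segs starts cutoff n (i + 1)
        (pvEmitB starts (chr_segs.getD i (0, 0)).2 (i + 1) (cutoff.getD i 0) out)
    else out
termination_by i _ => n - i

-- 'for i, seg in sorted(enumerate(chr_segs), key=lambda t: t[1][1]): …; cutoff[i] = p'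
-- (enumerate indices are the Ints 0..n-1, so '.toNat' is exact here; 'cutoff[i] = p' is List.set)
def pvCutoffB (starts : List Int) (n : Nat) (order : List (Int × (Int × Int))) : List Nat :=
  (order.foldl (fun st t =>
      let p' := pvAdvance starts t.2.2 st.1
      (p', st.2.set t.1.toNat p'))
    ((0 : Nat), List.replicate n (0 : Nat))).2

def find_overlaps_alt (segs : List (String × List (Int × Int))) (is_sorted : Bool) : List (String × List (Int × Int)) :=
  (segs.foldl (fun ov p =>
      let chr_segs := if is_sorted = false then PySem.List.sorted p.2 (fun x => x.1) else p.2
      let n := chr_segs.length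
      let starts := chr_segs.map (fun s => s.1)
      let cutoff := pvCutoffB starts n (PySem.List.sorted (PySem.List.enumerate chr_segs) (fun t => t.2.2))
      let out := pvLoopB chr_segs starts cutoff n 0 []
      if out = [] then ov else ov.insert p.1 out)
    PySem.Dict.empty).items

-- ===== PRECONDITION & SPEC =====
-- Pre_ excludes calls with is_sorted=True whose segment lists are not actually sorted by start
-- (the function's documented precondition): there A's linear break-scan and B's two-pointer sweep
-- both operate on data violating the stated assumption and return different accidental values.
-- (Duplicate chromosome keys cannot occur in a Python dict, so the Nodup conjunct excludes no
-- reachable input.)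
def Pre_find_overlaps (segs : List (String × List (Int × Int))) (is_sorted : Bool) : Prop :=
  (segs.map Prod.fst).Nodup ∧
  (is_sorted = true → ∀ p ∈ segs, p.2.Pairwise (fun a b => a.1 ≤ b.1))
instance (segs : List (String × List (Int × Int))) (is_sorted : Bool) : Decidable (Pre_find_overlaps segs is_sorted) := by unfold Pre_find_overlaps; infer_instance

def pvWitness_find_overlaps : (List (String × List (Int × Int))) × Bool :=
  ([("1", [(0, 5), (2, 7), (10, 11)]), ("2", [(4, 3), (1, 2)])], false)

def Spec_find_overlaps (segs : List (String × List (Int × Int))) (is_sorted : Bool) (out : List (String × List (Int × Int))) : Prop := out = find_overlaps_alt segs is_sorted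
instance (segs : List (String × List (Int × Int))) (is_sorted : Bool) (out : List (String × List (Int × Int))) : Decidable (Spec_find_overlaps segs is_sorted out) := by unfold Spec_find_overlaps; infer_instance

-- ===== CLAIM (what is proved, stated in full; the proofs are below) =====
def Claim_equal_find_overlaps : Prop := ∀ (segs : List (String × List (Int × Int))) (is_sorted : Bool), Dom_find_overlaps segs is_sorted → Pre_find_overlaps segs is_sorted → Spec_find_overlaps segs is_sorted (find_overlaps segs is_sorted)

-- ===== LEMMAS AND PROOFS =====

-- the per-chromosome list of emitted overlap pairs, in A's (i, then j) order
def pvSpecChr : List (Int × Int) → List (Int × Int)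
  | [] => []
  | seg :: tl => (tl.takeWhile (fun t => decide (t.1 < seg.2))).map (fun t => (t.1, seg.2)) ++ pvSpecChr tl

-- the number of starts strictly below e
def pvCFull (starts : List Int) (e : Int) : Nat :=
  (starts.takeWhile (fun y => decide (y < e))).length

-- A's "create key lazily, then append" step
def pvPush (chr : String) (ov : PySem.Dict String (List (Int × Int))) (x : Int × Int) :
    PySem.Dict String (List (Int × Int)) :=
  let ov' := if ov.contains chr then ov else ov.insert chr []
  ov'.insert chr (ov'.getD chr [] ++ [x])

theorem pvPush_eq (chr : String) (ov : PySem.Dict String (List (Int × Int))) (x : Int × Int) :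
    pvPush chr ov x = ov.insert chr (ov.getD chr [] ++ [x]) := by
  unfold pvPush
  by_cases h : ov.contains chr
  · simp [h]
  · simp only [Bool.not_eq_true] at h
    simp [h, PySem.Dict.getD_insert_self, PySem.Dict.insert_insert_self,
      PySem.Dict.getD_of_not_contains ov ([] : List (Int × Int)) h]

theorem pvInnerA_eq (chr : String) (e : Int) (tl : List (Int × Int))
    (ov : PySem.Dict String (List (Int × Int))) :
    pvInnerA chr e tl ov =
      ((tl.takeWhile (fun t => decide (t.1 < e))).map (fun t => (t.1, e))).foldl (pvPush chr) ov := by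
  induction tl generalizing ov with
  | nil => simp [pvInnerA]
  | cons t tl ih =>
    by_cases h : e ≤ t.1
    · simp [pvInnerA, h, not_lt.mpr h]
    · have ht : t.1 < e := lt_of_not_ge h
      simp only [pvInnerA, if_neg h, List.takeWhile_cons, decide_eq_true ht]
      rw [ih]
      rfl

theorem pvPush_foldl (chr : String) (xs : List (Int × Int)) (l : List (Int × Int))
    (ov : PySem.Dict String (List (Int × Int))) :
    xs.foldl (pvPush chr) (ov.insert chr l) = ov.insert chr (l ++ xs) := by
  induction xs generalizing l with
  | nil => simp
  | cons x xs ih =>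
    simp only [List.foldl_cons, pvPush_eq, PySem.Dict.getD_insert_self,
      PySem.Dict.insert_insert_self]
    rw [ih]
    simp

theorem pvPush_foldl_fresh (chr : String) (xs : List (Int × Int))
    (ov : PySem.Dict String (List (Int × Int))) (h : ov.contains chr = false) :
    xs.foldl (pvPush chr) ov = if xs = [] then ov else ov.insert chr xs := by
  cases xs with
  | nil => simp
  | cons x xs =>
    simp only [List.foldl_cons, pvPush_eq, PySem.Dict.getD_of_not_contains ov ([] : List (Int × Int)) h,
      List.nil_append]
    rw [pvPush_foldl]
    simp

theorem pvOuterA_eq (chr : String) (cs : List (Int × Int))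
    (ov : PySem.Dict String (List (Int × Int))) :
    pvOuterA chr cs ov = (pvSpecChr cs).foldl (pvPush chr) ov := by
  induction cs generalizing ov with
  | nil => simp [pvOuterA, pvSpecChr]
  | cons seg tl ih =>
    simp only [pvOuterA, pvSpecChr, List.foldl_append]
    rw [ih, pvInnerA_eq]

-- length of a Bool-prefix: the takeWhile prefix has length k when everything before k
-- satisfies p and position k (if any) does not
theorem pv_takeWhile_length {α : Type} (p : α → Bool) (ys : List α) (k : Nat)
    (hk : k ≤ ys.length)
    (h1 : ∀ j (hj : j < ys.length), j < k → p ys[j] = true)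
    (h2 : ∀ (hj : k < ys.length), p ys[k] = false) :
    (ys.takeWhile p).length = k := by
  induction ys generalizing k with
  | nil =>
    have h0 : k = 0 := Nat.le_zero.mp hk
    simp [h0]
  | cons y t ih =>
    cases k with
    | zero =>
      have h0 : p y = false := h2 (by simp)
      simp [h0]
    | succ k =>
      have hy : p y = true := h1 0 (by simp) (Nat.succ_pos k)
      simp only [List.takeWhile_cons, hy, if_true, List.length_cons]
      have := ih k (by simpa using hk)
        (fun j hj hjk => by simpa using h1 (j + 1) (by simpa using hj) (by omega))
        (fun hj => by simpa using h2 (by simpa using hj))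
      omega

theorem pv_take_length_takeWhile {α : Type} (p : α → Bool) (l : List α) :
    l.take (l.takeWhile p).length = l.takeWhile p := by
  induction l with
  | nil => simp
  | cons a l ih =>
    cases hp : p a <;> simp [hp, ih]

-- positions strictly before the takeWhile length satisfy the predicate
theorem pv_lt_of_lt_cFull (starts : List Int) (e : Int) (m : Nat) (hm : m < starts.length)
    (h : m < pvCFull starts e) : starts[m] < e := by
  unfold pvCFull at h
  have htw := pv_take_length_takeWhile (fun y => decide (y < e)) starts
  have hmem : starts[m] ∈ starts.takeWhile (fun y => decide (y < e)) := by
    rw [← htw]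
    exact List.mem_take_iff_getElem.mpr ⟨m, by omega, by simp⟩
  simpa using List.mem_takeWhile_imp hmem

-- the element at the takeWhile length (if any) fails the predicate
theorem pv_cFull_false (starts : List Int) (e : Int) (h : pvCFull starts e < starts.length) :
    ¬ starts[pvCFull starts e] < e := by
  unfold pvCFull at *
  induction starts with
  | nil => simp at h
  | cons a l ih =>
    by_cases ha : a < e
    · simp only [List.takeWhile_cons, decide_eq_true ha, List.length_cons] at h ⊢
      simpa using ih (by simpa using h)
    · simpa [List.takeWhile_cons, decide_eq_false ha] using ha

-- on a sorted list, positions at or beyond the takeWhile length fail the predicate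
theorem pv_not_lt_of_cFull_le (starts : List Int) (e : Int)
    (hs : starts.Pairwise (· ≤ ·)) (m : Nat) (hm : m < starts.length)
    (h : pvCFull starts e ≤ m) : ¬ starts[m] < e := by
  have hc : pvCFull starts e < starts.length := lt_of_le_of_lt h hm
  have h1 := pv_cFull_false starts e hc
  rcases Nat.eq_or_lt_of_le h with heq | hlt
  · simpa [heq] using h1
  · intro hcon
    have := List.pairwise_iff_getElem.mp hs _ _ hc hm hlt
    exact h1 (lt_of_le_of_lt this hcon)

theorem pv_cFull_le_length (starts : List Int) (e : Int) : pvCFull starts e ≤ starts.length := by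
  unfold pvCFull
  simpa using (List.takeWhile_sublist _).length_le

theorem pv_cFull_mono (starts : List Int) (e e' : Int) (h : e ≤ e') :
    pvCFull starts e ≤ pvCFull starts e' := by
  unfold pvCFull
  induction starts with
  | nil => simp
  | cons a l ih =>
    by_cases ha : a < e
    · have ha' : a < e' := lt_of_lt_of_le ha h
      simpa [List.takeWhile_cons, ha, ha'] using ih
    · simp [List.takeWhile_cons, ha]

theorem pvAdvance_eq (starts : List Int) (e : Int) (hs : starts.Pairwise (· ≤ ·)) :
    ∀ (d p : Nat), pvCFull starts e - p = d → p ≤ pvCFull starts e →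
      pvAdvance starts e p = pvCFull starts e := by
  intro d
  induction d with
  | zero =>
    intro p hd hp
    have hpe : p = pvCFull starts e := by omega
    rw [pvAdvance]
    rw [dif_neg]
    · exact hpe
    · rintro ⟨h1, h2⟩
      rw [List.getD_eq_getElem starts 0 h1] at h2
      exact pv_not_lt_of_cFull_le starts e hs p h1 (le_of_eq hpe.symm) h2
  | succ d ih =>
    intro p hd hp
    have hplt : p < pvCFull starts e := by omega
    have hpl : p < starts.length := lt_of_lt_of_le hplt (pv_cFull_le_length starts e)
    rw [pvAdvance, dif_pos ⟨hpl, by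
      rw [List.getD_eq_getElem starts 0 hpl]
      exact pv_lt_of_lt_cFull starts e p hpl hplt⟩]
    exact ih (p + 1) (by omega) (by omega)

-- the two-pointer fold sets cutoff[i] = pvCFull starts e_i for every visited (i, seg)
theorem pvCutoff_fold (starts : List Int) (hs : starts.Pairwise (· ≤ ·)) :
    ∀ (os : List (Int × (Int × Int))) (p : Nat) (cut : List Nat),
      os.Pairwise (fun a b => a.2.2 ≤ b.2.2) →
      (os.map (fun t => t.1.toNat)).Nodup →
      (∀ t ∈ os, p ≤ pvCFull starts t.2.2 ∧ t.1.toNat < cut.length) →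
      (∀ t ∈ os, ((os.foldl (fun st t =>
          let p' := pvAdvance starts t.2.2 st.1
          (p', st.2.set t.1.toNat p')) (p, cut)).2).getD t.1.toNat 0 = pvCFull starts t.2.2) ∧
      (∀ i, i ∉ os.map (fun t => t.1.toNat) → ((os.foldl (fun st t =>
          let p' := pvAdvance starts t.2.2 st.1
          (p', st.2.set t.1.toNat p')) (p, cut)).2).getD i 0 = cut.getD i 0) := by
  intro os
  induction os with
  | nil => intro p cut _ _ _; exact ⟨by simp, by simp⟩
  | cons a tl ih =>
    intro p cut hpw hnd hb
    have ha := hb a (List.mem_cons_self ..)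
    have hadv : pvAdvance starts a.2.2 p = pvCFull starts a.2.2 :=
      pvAdvance_eq starts a.2.2 hs _ p rfl ha.1
    have hnd' := hnd
    rw [List.map_cons, List.nodup_cons] at hnd'
    have hpw' := List.pairwise_cons.mp hpw
    have hstep := ih (pvCFull starts a.2.2) (cut.set a.1.toNat (pvCFull starts a.2.2))
      hpw'.2 hnd'.2
      (fun t ht => ⟨pv_cFull_mono starts _ _ (hpw'.1 t ht),
          by simpa using (hb t (List.mem_cons_of_mem _ ht)).2⟩)
    constructor
    · intro t ht
      rcases List.mem_cons.mp ht with rfl | ht'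
      · simp only [List.foldl_cons, hadv]
        rw [hstep.2 t.1.toNat hnd'.1]
        rw [List.getD_eq_getElem _ 0 (by simpa using ha.2)]
        simp [List.getElem_set_self]
      · simp only [List.foldl_cons, hadv]
        exact hstep.1 t ht'
    · intro i hi
      have hi1 : i ≠ a.1.toNat := fun h => hi (by simp [h])
      have hi2 : i ∉ tl.map (fun t => t.1.toNat) := fun h => hi (List.mem_cons_of_mem _ h)
      simp only [List.foldl_cons, hadv]
      rw [hstep.2 i hi2]
      simp [List.getD, List.getElem?_set_ne (Ne.symm hi1)]

theorem pvEmitB_eq (starts : List Int) (e : Int) :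
    ∀ (d j bound : Nat) (out : List (Int × Int)), bound - j = d → bound ≤ starts.length →
      pvEmitB starts e j bound out =
        out ++ ((starts.drop j).take (bound - j)).map (fun s => (s, e)) := by
  intro d
  induction d with
  | zero =>
    intro j bound out hd hb
    rw [pvEmitB, if_neg (by omega), hd]
    simp
  | succ d ih =>
    intro j bound out hd hb
    have hj : j < bound := by omega
    have hjlen : j < starts.length := by omega
    rw [pvEmitB, if_pos hj, ih (j + 1) bound _ (by omega) hb]
    rw [show bound - j = (bound - (j + 1)) + 1 by omega,
      List.drop_eq_getElem_cons hjlen, List.take_succ_cons, List.map_cons,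
      List.getD_eq_getElem starts (0 : Int) hjlen]
    simp

-- on a sorted list, the take-window up to the cutoff IS the takeWhile window of the tail
theorem pv_take_cutoff_eq_takeWhile (starts : List Int) (e : Int)
    (hs : starts.Pairwise (· ≤ ·)) (k : Nat) :
    (starts.drop k).take (pvCFull starts e - k) =
      (starts.drop k).takeWhile (fun y => decide (y < e)) := by
  have hlen : ((starts.drop k).takeWhile (fun y => decide (y < e))).length
      = pvCFull starts e - k := by
    apply pv_takeWhile_length
    · have := pv_cFull_le_length starts e
      simp only [List.length_drop]
      omega
    · intro j hj hjk
      simp only [List.length_drop] at hj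
      rw [List.getElem_drop]
      exact decide_eq_true (pv_lt_of_lt_cFull starts e (k + j) (by omega) (by omega))
    · intro hj
      simp only [List.length_drop] at hj
      rw [List.getElem_drop]
      exact decide_eq_false
        (pv_not_lt_of_cFull_le starts e hs (k + (pvCFull starts e - k)) (by omega) (by omega))
  rw [← hlen, pv_take_length_takeWhile]

theorem pvLoopB_step (cs : List (Int × Int)) (starts : List Int) (cutoff : List Nat) (n i : Nat)
    (out : List (Int × Int)) (h : i < n) :
    pvLoopB cs starts cutoff n i out =
      pvLoopB cs starts cutoff n (i + 1)
        (pvEmitB starts (cs.getD i (0, 0)).2 (i + 1) (cutoff.getD i 0) out) := by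
  rw [pvLoopB]
  simp [h]

theorem pvLoopB_eq (cs : List (Int × Int)) (cutoff : List Nat)
    (hs : cs.Pairwise (fun a b => a.1 ≤ b.1))
    (hcut : ∀ i (h : i < cs.length), cutoff.getD i 0 = pvCFull (cs.map (fun s => s.1)) cs[i].2) :
    ∀ (d i : Nat) (out : List (Int × Int)), cs.length - i = d →
      pvLoopB cs (cs.map (fun s => s.1)) cutoff cs.length i out = out ++ pvSpecChr (cs.drop i) := by
  intro d
  induction d with
  | zero =>
    intro i out hd
    rw [pvLoopB, if_neg (by omega)]
    rw [List.drop_eq_nil_of_le (by omega)]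
    simp [pvSpecChr]
  | succ d ih =>
    intro i out hd
    have hi : i < cs.length := by omega
    have hgd : cs.getD i (0, 0) = cs[i] := List.getD_eq_getElem cs (0, 0) hi
    have hsp : (cs.map (fun s => s.1)).Pairwise (· ≤ ·) := by
      rw [List.pairwise_map]; exact hs
    rw [pvLoopB_step _ _ _ _ _ _ hi,
      pvEmitB_eq _ _ _ (i + 1) _ _ rfl (by
        rw [hcut i hi]
        exact le_trans (pv_cFull_le_length _ _) (by simp)),
      ih (i + 1) _ (by omega)]
    rw [hgd, hcut i hi, pv_take_cutoff_eq_takeWhile _ _ hsp (i + 1)]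
    have hdrop : (List.map (fun s => s.1) cs).drop (i + 1) = (cs.drop (i + 1)).map (fun s => s.1) := by
      simp
    rw [hdrop, List.takeWhile_map]
    conv_rhs => rw [List.drop_eq_getElem_cons hi]
    simp only [pvSpecChr, List.map_map, List.append_assoc]
    rfl

-- ((enumerate cs).map (fun t => t.1.toNat)) is the range 0..n-1
theorem pv_enum_map_toNat (cs : List (Int × Int)) :
    ((PySem.List.enumerate cs).map (fun t => t.1.toNat)) = List.range cs.length := by
  apply List.ext_getElem
  · simp [PySem.List.length_enumerate]
  · intro k h1 h2
    simp only [List.getElem_map, List.getElem_range]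
    rw [PySem.List.getElem_enumerate]
    simp

-- the cutoff list computed by B is correct at every index
theorem pvCutoffB_correct (cs : List (Int × Int)) (hs : cs.Pairwise (fun a b => a.1 ≤ b.1)) :
    ∀ i (h : i < cs.length),
      (pvCutoffB (cs.map (fun s => s.1)) cs.length
        (PySem.List.sorted (PySem.List.enumerate cs) (fun t => t.2.2))).getD i 0 =
      pvCFull (cs.map (fun s => s.1)) cs[i].2 := by
  intro i hi
  set os := PySem.List.sorted (PySem.List.enumerate cs) (fun t => t.2.2) with hos
  have hperm : os.Perm (PySem.List.enumerate cs) := PySem.List.sorted_perm ..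
  have hsp : (cs.map (fun s => s.1)).Pairwise (· ≤ ·) := by
    rw [List.pairwise_map]; exact hs
  have hnd : (os.map (fun t => t.1.toNat)).Nodup := by
    refine (List.Perm.nodup_iff (List.Perm.map _ hperm)).mpr ?_
    rw [pv_enum_map_toNat]
    exact List.nodup_range
  have hb : ∀ t ∈ os, (0 : Nat) ≤ pvCFull (cs.map (fun s => s.1)) t.2.2 ∧
      t.1.toNat < (List.replicate cs.length (0 : Nat)).length := by
    intro t ht
    have ht' := hperm.mem_iff.mp (by rwa [hos] at ht)
    rcases (PySem.List.mem_enumerate_iff _ _ _).mp ht' with ⟨k, hk, rfl⟩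
    simp
    omega
  have hfold := pvCutoff_fold (cs.map (fun s => s.1)) hsp os 0
    (List.replicate cs.length (0 : Nat)) (PySem.List.sorted_pairwise ..) hnd hb
  have hmem : ((i : Int), cs[i]) ∈ os := by
    rw [hos, PySem.List.mem_sorted]
    exact (PySem.List.mem_enumerate_iff _ _ _).mpr ⟨i, hi, by simp⟩
  have := hfold.1 _ hmem
  simpa [pvCutoffB] using this

-- the two per-chromosome steps agree on a key not yet present
theorem pv_step_eq (chr : String) (cs : List (Int × Int))
    (hs : cs.Pairwise (fun a b => a.1 ≤ b.1))
    (ov : PySem.Dict String (List (Int × Int))) (h : ov.contains chr = false) :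
    pvOuterA chr cs ov =
      (if pvLoopB cs (cs.map (fun s => s.1))
            (pvCutoffB (cs.map (fun s => s.1)) cs.length
              (PySem.List.sorted (PySem.List.enumerate cs) (fun t => t.2.2)))
            cs.length 0 [] = [] then ov
       else ov.insert chr (pvLoopB cs (cs.map (fun s => s.1))
            (pvCutoffB (cs.map (fun s => s.1)) cs.length
              (PySem.List.sorted (PySem.List.enumerate cs) (fun t => t.2.2)))
            cs.length 0 [])) := by
  rw [pvOuterA_eq,
    pvLoopB_eq cs _ hs (pvCutoffB_correct cs hs) cs.length 0 [] rfl,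
    List.drop_zero, List.nil_append]
  exact pvPush_foldl_fresh chr (pvSpecChr cs) ov h

theorem pv_contains_step (ov : PySem.Dict String (List (Int × Int))) (out : List (Int × Int))
    (chr : String) (q : String) (h1 : ov.contains q = false) (h2 : q ≠ chr) :
    (if out = [] then ov else ov.insert chr out).contains q = false := by
  split
  · exact h1
  · simp [PySem.Dict.contains_insert, h1, h2]

theorem pv_fold_eq (is_sorted : Bool) :
    ∀ (segs : List (String × List (Int × Int))) (ov : PySem.Dict String (List (Int × Int))),
      (segs.map Prod.fst).Nodup →
      (is_sorted = true → ∀ p ∈ segs, p.2.Pairwise (fun a b => a.1 ≤ b.1)) →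
      (∀ p ∈ segs, ov.contains p.1 = false) →
      segs.foldl (fun ov p =>
        let chr_segs := if is_sorted = false then PySem.List.sorted p.2 (fun x => x.1) else p.2
        pvOuterA p.1 chr_segs ov) ov =
      segs.foldl (fun ov p =>
        let chr_segs := if is_sorted = false then PySem.List.sorted p.2 (fun x => x.1) else p.2
        let n := chr_segs.length
        let starts := chr_segs.map (fun s => s.1)
        let cutoff := pvCutoffB starts n (PySem.List.sorted (PySem.List.enumerate chr_segs) (fun t => t.2.2))
        let out := pvLoopB chr_segs starts cutoff n 0 []
        if out = [] then ov else ov.insert p.1 out) ov := by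
  intro segs
  induction segs with
  | nil => intro ov _ _ _; rfl
  | cons p rest ih =>
    intro ov hnd hsort hfresh
    have hnd' := hnd
    rw [List.map_cons, List.nodup_cons] at hnd'
    have hne : ∀ q ∈ rest, q.1 ≠ p.1 := by
      intro q hq hqe
      exact hnd'.1 (hqe ▸ List.mem_map_of_mem hq)
    have hcs : (if is_sorted = false then PySem.List.sorted p.2 (fun x => x.1) else p.2).Pairwise
        (fun a b => a.1 ≤ b.1) := by
      by_cases hb : is_sorted = false
      · rw [if_pos hb]
        exact PySem.List.sorted_pairwise p.2 (fun x => x.1)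
      · rw [if_neg hb]
        exact hsort (by simpa using hb) p (List.mem_cons_self ..)
    simp only [List.foldl_cons]
    rw [pv_step_eq p.1 _ hcs ov (hfresh p (List.mem_cons_self ..))]
    apply ih
    · exact hnd'.2
    · exact fun h q hq => hsort h q (List.mem_cons_of_mem _ hq)
    · intro q hq
      exact pv_contains_step _ _ _ _ (hfresh q (List.mem_cons_of_mem _ hq)) (hne q hq)

-- ===== VERDICT (by name: the statement is the Claim_ definition above) =====
theorem find_overlaps_spec : Claim_equal_find_overlaps := by
  intro segs is_sorted _hdom hpre
  unfold Spec_find_overlaps find_overlaps find_overlaps_alt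
  rw [pv_fold_eq is_sorted segs PySem.Dict.empty hpre.1 hpre.2
    (fun p _ => PySem.Dict.contains_empty _)]
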